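-- pv_equiv track=rewrite | github.com/Ridepad/uwu-logs | logs_dmg_useful.py | add_custom_units
-- ===== SOURCE A (Python) =====
-- from collections import defaultdict
--
-- CUSTOM_GROUPS: dict[str, dict[str, tuple[str]]] = {
--     "Lady Deathwhisper": {
--         "Adds": ("009402", "00943D", "009655"),
--     },
--     "Professor Putricide": {
--         "Oozes": ("0092BA", "009341"),
--     },
--     "Halion": {
--         "Halion": ("009BB7", "009CCE"),
--         "Adds": ("009EE9", "009EEB"),
--     }
-- }
--
-- def no_units_from_custom_group(guids, all_units):
--     return not set(guids) & all_units
--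
-- def add_custom_units(data: dict[str, defaultdict[str, int]], encounter_name: str):
--     _custom_groups = CUSTOM_GROUPS.get(encounter_name)
--     if not _custom_groups:
--         return {}
--
--     all_units = set(data)
--     custom_data = {}
--     for group_name, guids in _custom_groups.items():
--         if no_units_from_custom_group(guids, all_units):
--             continue
--         q = custom_data[group_name] = defaultdict(int)
--         for guid in guids:
--             if guid not in data:
--                 continue
--             for player_guid, player_damage in data[guid].items():
--                 q[player_guid] += player_damage
--
--     return custom_data
-- ===== SOURCE B (Python) =====
-- from collections import defaultdict
--
-- CUSTOM_GROUPS: dict[str, dict[str, tuple[str]]] = {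
--     "Lady Deathwhisper": {
--         "Adds": ("009402", "00943D", "009655"),
--     },
--     "Professor Putricide": {
--         "Oozes": ("0092BA", "009341"),
--     },
--     "Halion": {
--         "Halion": ("009BB7", "009CCE"),
--         "Adds": ("009EE9", "009EEB"),
--     }
-- }
--
-- def add_custom_units(data: dict[str, defaultdict[str, int]], encounter_name: str):
--     groups = CUSTOM_GROUPS.get(encounter_name)
--     if not groups:
--         return {}
--     custom_data = {}
--     for group_name, guids in groups.items():
--         if any(g in data for g in guids):
--             pairs = [pair for g in guids if g in data for pair in data[g].items()]
--             order = dict.fromkeys(k for k, _ in pairs)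
--             custom_data[group_name] = {k: sum(v for kk, v in pairs if kk == k) for k in order}
--     return custom_data
-- ===== Notes on version B (the rewrite author's own statement) =====
-- stated objective: alternative
-- what changed: B replaces A's incremental defaultdict accumulation guarded by an all_units set intersection with a grouping-by-key computation: per group it flattens the present inner dicts into one pair list, takes first-occurrence key order via dict.fromkeys, and builds each value as a per-key sum comprehension.
import Mathlib
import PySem

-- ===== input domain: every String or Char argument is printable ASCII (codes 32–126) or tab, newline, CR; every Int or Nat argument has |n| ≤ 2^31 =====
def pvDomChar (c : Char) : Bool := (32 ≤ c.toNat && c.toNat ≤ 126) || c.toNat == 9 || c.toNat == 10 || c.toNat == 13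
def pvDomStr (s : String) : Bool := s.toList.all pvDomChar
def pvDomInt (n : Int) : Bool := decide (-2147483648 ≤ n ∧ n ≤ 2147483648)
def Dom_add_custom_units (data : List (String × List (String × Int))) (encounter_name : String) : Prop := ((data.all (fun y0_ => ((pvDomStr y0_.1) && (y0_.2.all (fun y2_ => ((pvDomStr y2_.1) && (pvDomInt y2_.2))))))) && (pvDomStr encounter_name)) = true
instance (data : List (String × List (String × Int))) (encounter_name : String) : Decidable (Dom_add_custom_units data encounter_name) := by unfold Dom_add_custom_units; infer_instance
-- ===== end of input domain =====

-- B computes each group by flattening the present inner dicts into one pair list and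
-- grouping by key (first-occurrence dedup + per-key sums) instead of A's incremental
-- defaultdict accumulation guarded by an all_units set intersection (objective: alternative).

-- ===== PORT A =====
-- the module constant CUSTOM_GROUPS.get(encounter_name) (absent -> the empty list, falsy like None)
def pvCustomGroups (name : String) : List (String × List String) :=
  if name = "Lady Deathwhisper" then [("Adds", ["009402", "00943D", "009655"])]
  else if name = "Professor Putricide" then [("Oozes", ["0092BA", "009341"])]
  else if name = "Halion" then [("Halion", ["009BB7", "009CCE"]), ("Adds", ["009EE9", "009EEB"])]
  else []

-- no_units_from_custom_group: not set(guids) & all_units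
def pvNoUnitsFromCustomGroup (guids : List String) (allUnits : PySem.Set String) : Bool :=
  (PySem.Set.inter (PySem.Set.ofList guids) allUnits).isEmpty

-- for player_guid, player_damage in data[guid].items(): q[player_guid] += player_damage
def pvAccumA (q : PySem.Dict String Int) (items : List (String × Int)) : PySem.Dict String Int :=
  items.foldl (fun q p => q.modify p.1 0 (· + p.2)) q

def add_custom_units (data : List (String × List (String × Int))) (encounter_name : String) : List (String × List (String × Int)) :=
  let groups := pvCustomGroups encounter_name
  if groups.isEmpty then []
  else
    let allUnits : PySem.Set String := PySem.Set.ofList (data.map (·.1))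
    groups.foldl (fun customData gp =>
      if pvNoUnitsFromCustomGroup gp.2 allUnits then customData
      else
        let q := gp.2.foldl (fun q guid =>
          match data.find? (fun p => p.1 == guid) with   -- 'guid not in data: continue' then data[guid]
          | none => q
          | some p => pvAccumA q p.2) PySem.Dict.empty
        customData ++ [(gp.1, q.items)]) []

-- ===== PORT B =====
def add_custom_units_alt (data : List (String × List (String × Int))) (encounter_name : String) : List (String × List (String × Int)) :=
  let groups := pvCustomGroups encounter_name
  if groups.isEmpty then []
  else
    groups.foldl (fun customData gp =>
      -- any(g in data for g in guids)
      if gp.2.any (fun g => data.any (fun p => p.1 == g)) then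
        -- pairs = [pair for g in guids if g in data for pair in data[g].items()]
        let pairs := gp.2.flatMap (fun g =>
          match data.find? (fun p => p.1 == g) with
          | none => []
          | some p => p.2)
        -- order = dict.fromkeys(k for k, _ in pairs)
        let order := PySem.List.dedup (pairs.map (·.1))
        -- {k: sum(v for kk, v in pairs if kk == k) for k in order}
        customData ++ [(gp.1, order.map (fun k => (k, ((pairs.filter (fun p => p.1 == k)).map (·.2)).sum)))]
      else customData) []

-- ===== PRECONDITION & SPEC =====
def Spec_add_custom_units (data : List (String × List (String × Int))) (encounter_name : String) (out : List (String × List (String × Int))) : Prop := out = add_custom_units_alt data encounter_name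
instance (data : List (String × List (String × Int))) (encounter_name : String) (out : List (String × List (String × Int))) : Decidable (Spec_add_custom_units data encounter_name out) := by unfold Spec_add_custom_units; infer_instance

-- ===== CLAIM =====
def Claim_equal_add_custom_units : Prop := ∀ (data : List (String × List (String × Int))) (encounter_name : String), Dom_add_custom_units data encounter_name → Spec_add_custom_units data encounter_name (add_custom_units data encounter_name)

-- ===== LEMMAS AND PROOFS =====

-- A's set-intersection emptiness check is the negation of B's any-membership check
lemma pv_cond_eq (data : List (String × List (String × Int))) (guids : List String) :
    pvNoUnitsFromCustomGroup guids (PySem.Set.ofList (data.map (·.1)))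
      = !(guids.any (fun g => data.any (fun p => p.1 == g))) := by
  rw [Bool.eq_iff_iff, pvNoUnitsFromCustomGroup, List.isEmpty_iff,
    List.eq_nil_iff_forall_not_mem, Bool.not_eq_eq_eq_not, Bool.not_true, List.any_eq_false]
  constructor
  · intro h g hg hany
    rw [List.any_eq_true] at hany
    obtain ⟨p, hp, he⟩ := hany
    exact h p.1 (by
      rw [PySem.Set.mem_inter, PySem.Set.mem_ofList, PySem.Set.mem_ofList]
      exact ⟨by simpa using (beq_iff_eq.1 he ▸ hg), List.mem_map.2 ⟨p, hp, rfl⟩⟩)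
  · intro h x hx
    rw [PySem.Set.mem_inter, PySem.Set.mem_ofList, PySem.Set.mem_ofList] at hx
    obtain ⟨p, hp, he⟩ := List.mem_map.1 hx.2
    have := h x hx.1
    rw [List.any_eq_true] at this
    exact this ⟨p, hp, by simp [he]⟩

-- A's guid-by-guid accumulation is the single accumulation over the flattened pair list
lemma pv_flatten_eq (data : List (String × List (String × Int))) (guids : List String)
    (q : PySem.Dict String Int) :
    guids.foldl (fun q guid =>
        match data.find? (fun p => p.1 == guid) with
        | none => q
        | some p => pvAccumA q p.2) q
      = (guids.flatMap (fun g =>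
          match data.find? (fun p => p.1 == g) with
          | none => []
          | some p => p.2)).foldl (fun q p => q.modify p.1 0 (· + p.2)) q := by
  induction guids generalizing q with
  | nil => rfl
  | cons g gs ih =>
    simp only [List.foldl_cons, List.flatMap_cons, List.foldl_append]
    cases data.find? (fun p => p.1 == g) with
    | none => exact ih q
    | some r => exact ih (pvAccumA q r.2)

-- running-sum invariant of the modify loop
lemma pv_getD_fold (pairs : List (String × Int)) (d : PySem.Dict String Int) (k : String) :
    (pairs.foldl (fun q p => q.modify p.1 0 (· + p.2)) d).getD k 0
      = d.getD k 0 + ((pairs.filter (fun p => p.1 == k)).map (·.2)).sum := by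
  induction pairs generalizing d with
  | nil => simp
  | cons p ps ih =>
    simp only [List.foldl_cons, List.filter_cons]
    rw [ih]
    by_cases hk : p.1 = k
    · rw [if_pos (by simpa using hk), PySem.Dict.getD_modify]
      simp [hk]
      ring
    · rw [if_neg (by simpa using hk), PySem.Dict.getD_modify]
      simp [Ne.symm hk]

-- items of the accumulated dict are exactly B's grouped-by-key list
lemma pv_items_fold (pairs : List (String × Int)) :
    (pairs.foldl (fun q p => q.modify p.1 0 (· + p.2)) PySem.Dict.empty).items
      = (PySem.List.dedup (pairs.map (·.1))).map
          (fun k => (k, ((pairs.filter (fun p => p.1 == k)).map (·.2)).sum)) := by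
  have hkeys : (pairs.foldl (fun q p => q.modify p.1 0 (· + p.2)) PySem.Dict.empty).keys
      = PySem.Set.update PySem.Dict.empty.keys (pairs.map (·.1)) :=
    PySem.Dict.keys_foldl_modify_key pairs (·.1) 0 (fun q p => (· + p.2)) PySem.Dict.empty
  have hnd : (pairs.foldl (fun q p => q.modify p.1 0 (· + p.2)) PySem.Dict.empty).keys.Nodup :=
    PySem.Dict.nodup_keys_foldl_modify_key pairs (·.1) 0 (fun q p => (· + p.2)) PySem.Dict.empty
      PySem.Dict.nodup_keys_empty
  rw [PySem.Dict.items_eq_map_keys _ hnd 0, hkeys]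
  rw [show ((PySem.Dict.empty : PySem.Dict String Int).keys) = ([] : List String) from PySem.Dict.keys_empty,
    PySem.Set.update_nil_left, PySem.List.dedup_eq_ofList]
  refine List.map_congr_left (fun k _ => ?_)
  rw [pv_getD_fold]
  simp

-- ===== VERDICT =====
theorem add_custom_units_spec : Claim_equal_add_custom_units := by
  intro data encounter_name _
  show add_custom_units data encounter_name = add_custom_units_alt data encounter_name
  simp only [add_custom_units, add_custom_units_alt]
  by_cases hg : (pvCustomGroups encounter_name).isEmpty
  · simp [hg]
  · rw [if_neg hg, if_neg hg]
    congr 1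
    funext customData gp
    rw [pv_cond_eq data gp.2]
    cases h : gp.2.any (fun g => data.any (fun p => p.1 == g)) with
    | false => simp
    | true =>
      rw [pv_flatten_eq, pv_items_fold]
      simp
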